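-- pv_equiv track=rewrite | github.com/rainya/opskit | ado_audit/analyzers/analyze_techcomm.py | build_inventory
-- ===== SOURCE A (Python) =====
-- def build_inventory(all_teams, all_areas, all_boards, wi_counts_by_key):
--     """Build the techcomm_inventory rows: one per project+team.
--
--     Joins area paths and work item counts into each team row.
--
--     Args:
--         all_teams: list of matched team dicts (across projects)
--         all_areas: list of matched area dicts (across projects)
--         all_boards: list of matched board column dicts (across projects)
--         wi_counts_by_key: dict keyed by (project_id, area_path) -> count string
--
--     Returns:
--         list[dict]: Inventory rows
--     """
--     # Index areas by project
--     areas_by_project = {}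
--     for a in all_areas:
--         pid = a.get("Project ID", "")
--         areas_by_project.setdefault(pid, []).append(a.get("Path", ""))
--
--     # Index board names by (project, team_fragment)
--     boards_by_project = {}
--     for b in all_boards:
--         pid = b.get("Project ID", "")
--         board_name = b.get("Board Name", "")
--         boards_by_project.setdefault(pid, set()).add(board_name)
--
--     # Sum work item counts per project across matched areas
--     wi_by_project = {}
--     for a in all_areas:
--         pid = a.get("Project ID", "")
--         path = a.get("Path", "")
--         count_str = wi_counts_by_key.get((pid, path), "")
--         if count_str:
--             wi_by_project.setdefault(pid, []).append(count_str)
--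
--     rows = []
--     for t in all_teams:
--         pid = t.get("Project ID", "")
--         project = t.get("Project Name", "")
--         team = t.get("Team Name", "")
--
--         area_list = areas_by_project.get(pid, [])
--         board_set = boards_by_project.get(pid, set())
--
--         # Summarise work item counts for this project
--         count_parts = wi_by_project.get(pid, [])
--         total_display = _sum_counts(count_parts) if count_parts else ""
--
--         # Backlog visibility flags
--         vis = []
--         for level in ("Initiatives", "Epics", "Features", "Stories"):
--             if t.get(f"{level} Visible", "").lower() == "true":
--                 vis.append(level)
--
--         rows.append({
--             "Project ID": pid,
--             "Project Name": project,
--             "Team Name": team,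
--             "Team ID": t.get("Team ID", ""),
--             "Bug Behavior": t.get("Bug Behavior Label", ""),
--             "Backlog Iteration": t.get("Backlog Iteration Path", ""),
--             "Default Iteration": t.get("Default Iteration Path", ""),
--             "Backlog Levels Visible": "; ".join(vis),
--             "Area Paths": "; ".join(sorted(set(area_list))),
--             "Board Names": "; ".join(sorted(board_set)),
--             "Work Item Count (areas total)": total_display,
--             "Match Reason": t.get("Match Reason", ""),
--         })
--     return rows
--
-- def _sum_counts(parts):
--     """Sum a list of count strings, handling '>20000' style values."""
--     total = 0
--     has_gt = False
--     for p in parts: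
--         s = str(p).strip()
--         if s.startswith(">"):
--             has_gt = True
--             try:
--                 total += int(s[1:])
--             except ValueError:
--                 pass
--         else:
--             try:
--                 total += int(s)
--             except ValueError:
--                 pass
--     prefix = ">" if has_gt else ""
--     return f"{prefix}{total}"
-- ===== SOURCE B (Python) =====
-- # B: no index structures at all -- each row is built by direct scans over the raw lists
-- # (filter areas/boards by the team's project id on the spot); simpler, no dicts.
--
-- _LEVELS = ("Initiatives", "Epics", "Features", "Stories")
--
--
-- def _as_int(c):
--     s = str(c).strip()
--     body = s[1:] if s.startswith(">") else s
--     try: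
--         return int(body)
--     except ValueError:
--         return 0
--
--
-- def _row(t, all_areas, all_boards, wi_counts_by_key):
--     pid = t.get("Project ID", "")
--     my_paths = [a.get("Path", "") for a in all_areas
--                 if a.get("Project ID", "") == pid]
--     board_names = {b.get("Board Name", "") for b in all_boards
--                    if b.get("Project ID", "") == pid}
--     counts = [c for c in (wi_counts_by_key.get((pid, p), "") for p in my_paths) if c]
--     if counts:
--         gt = ">" if any(str(c).strip().startswith(">") for c in counts) else ""
--         total = gt + str(sum(_as_int(c) for c in counts))
--     else:
--         total = ""
--     vis = [l for l in _LEVELS if t.get(f"{l} Visible", "").lower() == "true"]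
--     return {
--         "Project ID": pid,
--         "Project Name": t.get("Project Name", ""),
--         "Team Name": t.get("Team Name", ""),
--         "Team ID": t.get("Team ID", ""),
--         "Bug Behavior": t.get("Bug Behavior Label", ""),
--         "Backlog Iteration": t.get("Backlog Iteration Path", ""),
--         "Default Iteration": t.get("Default Iteration Path", ""),
--         "Backlog Levels Visible": "; ".join(vis),
--         "Area Paths": "; ".join(sorted(set(my_paths))),
--         "Board Names": "; ".join(sorted(board_names)),
--         "Work Item Count (areas total)": total,
--         "Match Reason": t.get("Match Reason", ""),
--     }
--
--
-- def build_inventory(all_teams, all_areas, all_boards, wi_counts_by_key):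
--     return [_row(t, all_areas, all_boards, wi_counts_by_key) for t in all_teams]
-- ===== Notes on version B (the rewrite author's own statement) =====
-- stated objective: simpler
-- what changed: B drops A's three staged dictionary indexes entirely: each team row is built by direct filtering scans of the raw area/board lists for that team's project id, with the count total computed inline by any+sum over per-part parses instead of A's two-accumulator fold.
import Mathlib
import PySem

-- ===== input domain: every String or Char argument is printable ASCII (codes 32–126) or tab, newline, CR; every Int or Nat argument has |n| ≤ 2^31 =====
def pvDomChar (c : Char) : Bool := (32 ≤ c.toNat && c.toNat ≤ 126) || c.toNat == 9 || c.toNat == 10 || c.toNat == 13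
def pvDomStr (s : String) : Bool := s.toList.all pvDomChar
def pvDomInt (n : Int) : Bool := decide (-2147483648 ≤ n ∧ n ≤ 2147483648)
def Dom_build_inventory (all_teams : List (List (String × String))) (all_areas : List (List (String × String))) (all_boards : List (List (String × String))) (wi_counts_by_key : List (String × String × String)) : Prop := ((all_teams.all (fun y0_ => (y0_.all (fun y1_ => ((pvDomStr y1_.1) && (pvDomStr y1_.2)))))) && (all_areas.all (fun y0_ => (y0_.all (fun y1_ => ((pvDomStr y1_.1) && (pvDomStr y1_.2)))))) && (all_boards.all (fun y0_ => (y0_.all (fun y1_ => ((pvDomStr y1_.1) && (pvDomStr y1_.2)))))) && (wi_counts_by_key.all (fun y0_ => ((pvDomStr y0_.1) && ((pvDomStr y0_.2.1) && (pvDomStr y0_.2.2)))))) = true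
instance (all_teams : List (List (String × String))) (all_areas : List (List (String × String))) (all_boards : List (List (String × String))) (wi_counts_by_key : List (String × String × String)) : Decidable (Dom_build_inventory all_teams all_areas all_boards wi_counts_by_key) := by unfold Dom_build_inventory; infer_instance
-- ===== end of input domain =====

-- B builds each team row by direct filtering scans of the raw lists (no dictionary indexes); same return value, plainer code.


-- shared trivia used by both sources: Python's row.get(k, ""), the counts-dict lookup, the level names
def tget (d : List (String × String)) (k : String) : String :=
  (PySem.Dict.mk d).getD k ""

def wiget (w : List (String × String × String)) (pid path : String) : String :=
  match w.find? (fun p => p.1 == pid && p.2.1 == path) with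
  | some p => p.2.2
  | none => ""

def pvLevels : List String := ["Initiatives", "Epics", "Features", "Stories"]

-- ===== PORT A =====
def sum_counts (parts : List String) : String :=
  let r := parts.foldl (fun (acc : Int × Bool) p =>
      let s := PySem.Str.strip p
      if PySem.Str.startswith s ">" then
        match PySem.Int.ofStr? (PySem.Str.slice s (some 1) none) with
        | some v => (acc.1 + v, true)
        | none => (acc.1, true)
      else
        match PySem.Int.ofStr? s with
        | some v => (acc.1 + v, acc.2)
        | none => (acc.1, acc.2)) (0, false)
  (if r.2 then ">" else "") ++ PySem.Int.toStr r.1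

def build_inventory (all_teams : List (List (String × String))) (all_areas : List (List (String × String))) (all_boards : List (List (String × String))) (wi_counts_by_key : List (String × String × String)) : List (List (String × String)) :=
  let areas_by_project : PySem.Dict String (List String) :=
    all_areas.foldl (fun d a => d.modify (tget a "Project ID") [] (· ++ [tget a "Path"])) PySem.Dict.empty
  let boards_by_project : PySem.Dict String (PySem.Set String) :=
    all_boards.foldl (fun d b => d.modify (tget b "Project ID") PySem.Set.empty (fun s => PySem.Set.add s (tget b "Board Name"))) PySem.Dict.empty
  let wi_by_project : PySem.Dict String (List String) :=
    all_areas.foldl (fun d a =>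
      let count_str := wiget wi_counts_by_key (tget a "Project ID") (tget a "Path")
      if count_str ≠ "" then d.modify (tget a "Project ID") [] (· ++ [count_str]) else d) PySem.Dict.empty
  all_teams.foldl (fun rows t =>
    let pid := tget t "Project ID"
    let project := tget t "Project Name"
    let team := tget t "Team Name"
    let area_list := areas_by_project.getD pid []
    let board_set := boards_by_project.getD pid PySem.Set.empty
    let count_parts := wi_by_project.getD pid []
    let total_display := if count_parts ≠ [] then sum_counts count_parts else ""
    let vis := pvLevels.foldl (fun v level =>
        if PySem.Str.lower (tget t (level ++ " Visible")) == "true" then v ++ [level] else v) []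
    rows ++ [[("Project ID", pid),
      ("Project Name", project),
      ("Team Name", team),
      ("Team ID", tget t "Team ID"),
      ("Bug Behavior", tget t "Bug Behavior Label"),
      ("Backlog Iteration", tget t "Backlog Iteration Path"),
      ("Default Iteration", tget t "Default Iteration Path"),
      ("Backlog Levels Visible", PySem.Str.join "; " vis),
      ("Area Paths", PySem.Str.join "; " (PySem.List.sorted (PySem.Set.ofList area_list) (fun x => x) false)),
      ("Board Names", PySem.Str.join "; " (PySem.List.sorted board_set (fun x => x) false)),
      ("Work Item Count (areas total)", total_display),
      ("Match Reason", tget t "Match Reason")]]) []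

-- ===== PORT B =====
def as_int (c : String) : Int :=
  let s := PySem.Str.strip c
  let body := if PySem.Str.startswith s ">" then PySem.Str.slice s (some 1) none else s
  (PySem.Int.ofStr? body).getD 0

def row_for (t : List (String × String)) (all_areas : List (List (String × String))) (all_boards : List (List (String × String))) (wi_counts_by_key : List (String × String × String)) : List (String × String) :=
  let pid := tget t "Project ID"
  let my_paths := (all_areas.filter (fun a => tget a "Project ID" == pid)).map (fun a => tget a "Path")
  let board_names : PySem.Set String :=
    PySem.Set.ofList ((all_boards.filter (fun b => tget b "Project ID" == pid)).map (fun b => tget b "Board Name"))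
  let counts := (my_paths.map (fun p => wiget wi_counts_by_key pid p)).filter (fun c => decide (c ≠ ""))
  let total := if counts ≠ [] then
      (if counts.any (fun c => PySem.Str.startswith (PySem.Str.strip c) ">") then ">" else "")
        ++ PySem.Int.toStr (counts.map as_int).sum
    else ""
  let vis := pvLevels.filter (fun level => PySem.Str.lower (tget t (level ++ " Visible")) == "true")
  [("Project ID", pid),
   ("Project Name", tget t "Project Name"),
   ("Team Name", tget t "Team Name"),
   ("Team ID", tget t "Team ID"),
   ("Bug Behavior", tget t "Bug Behavior Label"),
   ("Backlog Iteration", tget t "Backlog Iteration Path"),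
   ("Default Iteration", tget t "Default Iteration Path"),
   ("Backlog Levels Visible", PySem.Str.join "; " vis),
   ("Area Paths", PySem.Str.join "; " (PySem.List.sorted (PySem.Set.ofList my_paths) (fun x => x) false)),
   ("Board Names", PySem.Str.join "; " (PySem.List.sorted board_names (fun x => x) false)),
   ("Work Item Count (areas total)", total),
   ("Match Reason", tget t "Match Reason")]

def build_inventory_alt (all_teams : List (List (String × String))) (all_areas : List (List (String × String))) (all_boards : List (List (String × String))) (wi_counts_by_key : List (String × String × String)) : List (List (String × String)) :=
  all_teams.map (fun t => row_for t all_areas all_boards wi_counts_by_key)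

-- ===== PRECONDITION & SPEC =====
def Spec_build_inventory (all_teams : List (List (String × String))) (all_areas : List (List (String × String))) (all_boards : List (List (String × String))) (wi_counts_by_key : List (String × String × String)) (out : List (List (String × String))) : Prop := out = build_inventory_alt all_teams all_areas all_boards wi_counts_by_key
instance (all_teams : List (List (String × String))) (all_areas : List (List (String × String))) (all_boards : List (List (String × String))) (wi_counts_by_key : List (String × String × String)) (out : List (List (String × String))) : Decidable (Spec_build_inventory all_teams all_areas all_boards wi_counts_by_key out) := by unfold Spec_build_inventory; infer_instance

-- ===== CLAIM (what is proved, stated in full; the proofs are below) =====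
def Claim_equal_build_inventory : Prop := ∀ (all_teams : List (List (String × String))) (all_areas : List (List (String × String))) (all_boards : List (List (String × String))) (wi_counts_by_key : List (String × String × String)), Dom_build_inventory all_teams all_areas all_boards wi_counts_by_key → Spec_build_inventory all_teams all_areas all_boards wi_counts_by_key (build_inventory all_teams all_areas all_boards wi_counts_by_key)

-- ===== LEMMAS AND PROOFS =====

-- generic: getD of a group-by-modify fold = fold of the step over the values filtered to that key
theorem getD_foldl_modify_step {ν β : Type} (g : ν → β → ν) (v0 : ν) :
    ∀ (L : List (String × β)) (d : PySem.Dict String ν) (k : String),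
      (L.foldl (fun d p => d.modify p.1 v0 (fun s => g s p.2)) d).getD k v0
        = ((L.filter (fun p => p.1 == k)).map (·.2)).foldl g (d.getD k v0) := by
  intro L
  induction L with
  | nil => intro d k; simp
  | cons p tl ih =>
      intro d k
      rw [List.foldl_cons, ih, List.filter_cons]
      by_cases h : (p.1 == k) = true
      · have hk : k = p.1 := (beq_iff_eq.mp h).symm
        rw [if_pos h, List.map_cons, List.foldl_cons, PySem.Dict.getD_modify, if_pos hk, hk]
      · have hk : ¬ k = p.1 := fun he => h (by simp [he])
        rw [if_neg h, PySem.Dict.getD_modify, if_neg hk]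

-- A's area index looked up at pid = B's filtered path list
theorem paths_getD (all_areas : List (List (String × String))) (pid : String) :
    (all_areas.foldl (fun d a => d.modify (tget a "Project ID") [] (· ++ [tget a "Path"])) PySem.Dict.empty).getD pid []
      = (all_areas.filter (fun a => tget a "Project ID" == pid)).map (fun a => tget a "Path") := by
  have h1 : (all_areas.foldl (fun d a => d.modify (tget a "Project ID") [] (· ++ [tget a "Path"])) PySem.Dict.empty)
      = ((all_areas.map (fun a => (tget a "Project ID", tget a "Path"))).foldl
          (fun (d : PySem.Dict String (List String)) p => d.modify p.1 [] (· ++ [p.2])) PySem.Dict.empty) := by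
    rw [List.foldl_map]
  rw [h1, PySem.Dict.getD_foldl_modify_append]
  simp [List.filter_map, Function.comp_def]

-- A's board index looked up at pid = set of B's filtered board names
theorem boards_getD (all_boards : List (List (String × String))) (pid : String) :
    (all_boards.foldl (fun d b => d.modify (tget b "Project ID") PySem.Set.empty (fun s => PySem.Set.add s (tget b "Board Name"))) PySem.Dict.empty).getD pid PySem.Set.empty
      = PySem.Set.ofList ((all_boards.filter (fun b => tget b "Project ID" == pid)).map (fun b => tget b "Board Name")) := by
  have h1 : (all_boards.foldl (fun d b => d.modify (tget b "Project ID") PySem.Set.empty (fun s => PySem.Set.add s (tget b "Board Name"))) PySem.Dict.empty)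
      = ((all_boards.map (fun b => (tget b "Project ID", tget b "Board Name"))).foldl
          (fun (d : PySem.Dict String (PySem.Set String)) p => d.modify p.1 PySem.Set.empty (fun s => PySem.Set.add s p.2)) PySem.Dict.empty) := by
    rw [List.foldl_map]
  rw [h1, getD_foldl_modify_step PySem.Set.add PySem.Set.empty]
  rw [PySem.Set.ofList_eq_foldl]
  simp [List.filter_map, Function.comp_def, PySem.Dict.getD_empty, List.foldl_map]

-- A's nonempty-counts index looked up at pid = the filtered count list over the areas of that project
theorem wi_getD (all_areas : List (List (String × String))) (w : List (String × String × String)) (pid : String) :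
    (all_areas.foldl (fun d a =>
        if wiget w (tget a "Project ID") (tget a "Path") ≠ "" then
          d.modify (tget a "Project ID") [] (· ++ [wiget w (tget a "Project ID") (tget a "Path")])
        else d) PySem.Dict.empty).getD pid []
      = ((all_areas.filter (fun a => tget a "Project ID" == pid)).map
          (fun a => wiget w (tget a "Project ID") (tget a "Path"))).filter (fun c => decide (c ≠ "")) := by
  have h1 : (all_areas.foldl (fun d a =>
        if wiget w (tget a "Project ID") (tget a "Path") ≠ "" then
          d.modify (tget a "Project ID") [] (· ++ [wiget w (tget a "Project ID") (tget a "Path")])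
        else d) PySem.Dict.empty)
      = ((all_areas.map (fun a => (tget a "Project ID", wiget w (tget a "Project ID") (tget a "Path")))).foldl
          (fun (d : PySem.Dict String (List String)) p => if p.2 ≠ "" then d.modify p.1 [] (· ++ [p.2]) else d)
          PySem.Dict.empty) := by
    rw [List.foldl_map]
  rw [h1, PySem.List.foldl_ite_eq_foldl_filter, PySem.Dict.getD_foldl_modify_append]
  simp [List.filter_map, List.filter_filter, Function.comp_def, Bool.and_comm]

-- B's as_int with its local bindings written out
theorem as_int_def (p : String) :
    as_int p = if PySem.Str.startswith (PySem.Str.strip p) ">" then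
        (PySem.Int.ofStr? (PySem.Str.slice (PySem.Str.strip p) (some 1) none)).getD 0
      else (PySem.Int.ofStr? (PySem.Str.strip p)).getD 0 := by
  show (PySem.Int.ofStr? (if PySem.Str.startswith (PySem.Str.strip p) ">" then
      PySem.Str.slice (PySem.Str.strip p) (some 1) none else PySem.Str.strip p)).getD 0 = _
  rw [apply_ite PySem.Int.ofStr?, apply_ite (fun o => Option.getD o (0 : Int))]

-- A's two-accumulator sum loop computes (sum of parsed values, any ">" marker)
theorem sum_loop_eq (f : Int × Bool → String → Int × Bool)
    (hf : ∀ a b p, f (a, b) p = (a + as_int p, b || PySem.Str.startswith (PySem.Str.strip p) ">")) :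
    ∀ (parts : List String) (t : Int) (h : Bool),
      parts.foldl f (t, h)
        = (t + (parts.map as_int).sum, h || parts.any (fun c => PySem.Str.startswith (PySem.Str.strip c) ">")) := by
  intro parts
  induction parts with
  | nil =>
      intro t h
      simp only [List.foldl_nil, List.map_nil, List.sum_nil, List.any_nil, Bool.or_false, add_zero]
  | cons p tl ih =>
      intro t h
      rw [List.foldl_cons, hf, ih]
      simp only [List.map_cons, List.sum_cons, List.any_cons, Prod.mk.injEq]
      constructor
      · ring
      · simp [Bool.or_assoc]

-- A's sum helper = B's inline any+sum display
theorem sum_counts_eq (parts : List String) :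
    sum_counts parts
      = (if parts.any (fun c => PySem.Str.startswith (PySem.Str.strip c) ">") then ">" else "")
          ++ PySem.Int.toStr (parts.map as_int).sum := by
  simp only [sum_counts]
  rw [sum_loop_eq _ ?hf parts 0 false]
  case hf =>
    intro a b p
    rw [as_int_def]
    generalize PySem.Str.startswith (PySem.Str.strip p) ">" = gt
    generalize PySem.Int.ofStr? (PySem.Str.slice (PySem.Str.strip p) (some 1) none) = o1
    generalize PySem.Int.ofStr? (PySem.Str.strip p) = o2
    cases gt <;> [cases o2; cases o1] <;> simp
  simp only [Bool.false_or, zero_add]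

theorem build_inventory_spec : Claim_equal_build_inventory := by
  intro all_teams all_areas all_boards wi_counts_by_key _h
  unfold Spec_build_inventory
  simp only [build_inventory, build_inventory_alt, row_for]
  rw [PySem.List.foldl_append_singleton_eq_map, List.nil_append]
  apply List.map_congr_left
  intro t _ht
  rw [PySem.List.foldl_append_if_eq_filter, List.nil_append]
  rw [paths_getD, boards_getD, wi_getD, sum_counts_eq]
  have hcs : ((all_areas.filter (fun a => tget a "Project ID" == tget t "Project ID")).map
        (fun a => wiget wi_counts_by_key (tget a "Project ID") (tget a "Path")))
      = (((all_areas.filter (fun a => tget a "Project ID" == tget t "Project ID")).map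
          (fun a => tget a "Path")).map (fun p => wiget wi_counts_by_key (tget t "Project ID") p)) := by
    rw [List.map_map]
    apply List.map_congr_left
    intro a ha
    have hk : tget a "Project ID" = tget t "Project ID" := by simpa using (List.mem_filter.mp ha).2
    simp [hk]
  rw [hcs]
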